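-- pv_equiv track=rewrite | github.com/TechGovStacks/StackAtlas | scripts/add-group-keys.py | insert_group_key
-- ===== SOURCE A (Python) =====
-- def insert_group_key(data: dict, group_key: str) -> dict:
--     """Return a new ordered dict with groupKey inserted after sublayer (or layer)."""
--     result = {}
--     inserted = False
--     for key, value in data.items():
--         result[key] = value
--         if not inserted and key in ("sublayer", "layer"):
--             # Insert after sublayer when present, otherwise after layer
--             if key == "sublayer" or "sublayer" not in data:
--                 result["groupKey"] = group_key
--                 inserted = True
--     if not inserted:
--         result["groupKey"] = group_key
--     return result
-- ===== SOURCE B (Python) =====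
-- def insert_group_key(data: dict, group_key: str) -> dict:
--     """Return a new ordered dict with groupKey inserted after sublayer (or layer)."""
--     items = list(data.items())
--     keys = [k for k, _ in items]
--     if "sublayer" in keys:
--         idx = keys.index("sublayer") + 1
--     elif "layer" in keys:
--         idx = keys.index("layer") + 1
--     else:
--         idx = len(keys)
--     result = dict(items[:idx])
--     result["groupKey"] = group_key
--     result.update(items[idx:])
--     return result
-- ===== Notes on version B (the rewrite author's own statement) =====
-- stated objective: simpler
-- what changed: Replaces A's flag-driven incremental loop (insert-as-you-go with an 'inserted' flag and per-key membership tests) by computing the split index once (index of sublayer/layer, else the end) and assembling the result as dict(prefix) + groupKey + update(suffix).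
import Mathlib
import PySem

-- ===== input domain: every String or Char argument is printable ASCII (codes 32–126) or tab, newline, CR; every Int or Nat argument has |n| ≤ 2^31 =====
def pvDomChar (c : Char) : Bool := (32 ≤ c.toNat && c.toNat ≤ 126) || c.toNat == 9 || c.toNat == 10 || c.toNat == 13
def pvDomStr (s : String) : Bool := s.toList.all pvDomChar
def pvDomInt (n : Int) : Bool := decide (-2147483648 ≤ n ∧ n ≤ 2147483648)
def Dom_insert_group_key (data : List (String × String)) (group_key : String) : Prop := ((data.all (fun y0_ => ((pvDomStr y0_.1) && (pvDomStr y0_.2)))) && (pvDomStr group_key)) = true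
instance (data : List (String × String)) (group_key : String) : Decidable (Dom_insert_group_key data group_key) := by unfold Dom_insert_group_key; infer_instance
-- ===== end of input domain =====

-- B replaces A's flag-driven incremental loop with an explicit split-index computation
-- plus two-chunk assembly (prefix dict, groupKey, update with suffix); objective: simpler.

-- ===== PORT A =====
-- loop body of A's for-statement, as a named helper (state = (result, inserted))
def igkStep (data : List (String × String)) (group_key : String)
    (st : PySem.Dict String String × Bool) (kv : String × String) :
    PySem.Dict String String × Bool :=
  let result := st.1.insert kv.1 kv.2
  if !st.2 && (kv.1 == "sublayer" || kv.1 == "layer") then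
    if kv.1 == "sublayer" || !((data.map Prod.fst).contains "sublayer") then
      (result.insert "groupKey" group_key, true)
    else (result, st.2)
  else (result, st.2)

def insert_group_key (data : List (String × String)) (group_key : String) : List (String × String) :=
  let fin := data.foldl (igkStep data group_key) (PySem.Dict.empty, false)
  if !fin.2 then (fin.1.insert "groupKey" group_key).items else fin.1.items

-- ===== PORT B =====
def insert_group_key_alt (data : List (String × String)) (group_key : String) : List (String × String) :=
  let keys := data.map Prod.fst
  let idx : Nat :=
    if keys.contains "sublayer" then (PySem.List.index? keys "sublayer").getD 0 + 1
    else if keys.contains "layer" then (PySem.List.index? keys "layer").getD 0 + 1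
    else keys.length
  let result := PySem.Dict.ofList (PySem.List.slice data none (some (idx : Int)))
  let result := result.insert "groupKey" group_key
  (result.update (PySem.List.slice data (some (idx : Int)) none)).items

-- ===== PRECONDITION & SPEC =====
def Spec_insert_group_key (data : List (String × String)) (group_key : String) (out : List (String × String)) : Prop := out = insert_group_key_alt data group_key
instance (data : List (String × String)) (group_key : String) (out : List (String × String)) : Decidable (Spec_insert_group_key data group_key out) := by unfold Spec_insert_group_key; infer_instance

-- ===== CLAIM (what is proved, stated in full; the proofs are below) =====
def Claim_equal_insert_group_key : Prop := ∀ (data : List (String × String)) (group_key : String), Dom_insert_group_key data group_key → Spec_insert_group_key data group_key (insert_group_key data group_key)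

-- ===== LEMMAS AND PROOFS =====

-- once inserted = true, A's loop is a plain dict-insert fold
theorem igk_fold_true (data : List (String × String)) (g : String) :
    ∀ (l : List (String × String)) (d : PySem.Dict String String),
      l.foldl (igkStep data g) (d, true) =
        (l.foldl (fun d kv => d.insert kv.1 kv.2) d, true) := by
  intro l
  induction l with
  | nil => intro d; rfl
  | cons kv t ih =>
    intro d
    have h : igkStep data g (d, true) kv = (d.insert kv.1 kv.2, true) := rfl
    rw [List.foldl_cons, h, ih, List.foldl_cons]

-- while no element triggers the insertion, A's loop is a plain fold with flag still false
theorem igk_fold_false (data : List (String × String)) (g : String) :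
    ∀ (l : List (String × String)) (d : PySem.Dict String String),
      (∀ kv ∈ l, kv.1 ≠ "sublayer" ∧ (kv.1 = "layer" → "sublayer" ∈ data.map Prod.fst)) →
      l.foldl (igkStep data g) (d, false) =
        (l.foldl (fun d kv => d.insert kv.1 kv.2) d, false) := by
  intro l
  induction l with
  | nil => intro d _; rfl
  | cons kv t ih =>
    intro d h
    have hkv := h kv (List.mem_cons_self)
    have ht : ∀ p ∈ t, p.1 ≠ "sublayer" ∧ (p.1 = "layer" → "sublayer" ∈ data.map Prod.fst) :=
      fun p hp => h p (List.mem_cons_of_mem _ hp)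
    have hns : (kv.1 == "sublayer") = false := beq_eq_false_iff_ne.mpr hkv.1
    have hstep : igkStep data g (d, false) kv = (d.insert kv.1 kv.2, false) := by
      by_cases hl : kv.1 = "layer"
      · have hs : (data.map Prod.fst).contains "sublayer" = true :=
          List.contains_iff_mem.mpr (hkv.2 hl)
        have hly : (kv.1 == "layer") = true := beq_iff_eq.mpr hl
        simp only [igkStep, hns, hly, hs, Bool.not_false, Bool.true_and, Bool.false_or,
          Bool.not_true, Bool.or_false, if_true, if_false, Bool.false_eq_true]
      · have hly : (kv.1 == "layer") = false := beq_eq_false_iff_ne.mpr hl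
        simp only [igkStep, hns, hly, Bool.not_false, Bool.true_and, Bool.or_false,
          Bool.false_eq_true, if_false]
    rw [List.foldl_cons, hstep, ih _ ht, List.foldl_cons]

-- first occurrence of a key splits the list
theorem exists_first_split (data : List (String × String)) (k : String)
    (h : k ∈ data.map Prod.fst) :
    ∃ pre v post, data = pre ++ (k, v) :: post ∧ k ∉ pre.map Prod.fst := by
  induction data with
  | nil => simp at h
  | cons kv t ih =>
    by_cases hk : kv.1 = k
    · exact ⟨[], kv.2, t, by rw [← hk]; rfl, by simp⟩
    · have h' : k ∈ t.map Prod.fst := by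
        rw [List.map_cons] at h
        rcases List.mem_cons.mp h with h1 | h2
        · exact absurd h1.symm hk
        · exact h2
      obtain ⟨pre, v, post, heq, hpre⟩ := ih h'
      refine ⟨kv :: pre, v, post, by rw [heq]; rfl, ?_⟩
      simp only [List.map_cons, List.mem_cons]
      rintro (h1 | h2)
      · exact hk h1.symm
      · exact hpre h2

-- common assembly both sides reach when a trigger key k0 is found right after pre
theorem igk_split_case (data pre post : List (String × String)) (k0 v : String) (g : String)
    (heq : data = pre ++ (k0, v) :: post)
    (hpre : ∀ kv ∈ pre, kv.1 ≠ "sublayer" ∧ (kv.1 = "layer" → "sublayer" ∈ data.map Prod.fst))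
    (htrig : igkStep data g (pre.foldl (fun d kv => d.insert kv.1 kv.2) PySem.Dict.empty, false) (k0, v)
      = (((pre.foldl (fun d kv => d.insert kv.1 kv.2) PySem.Dict.empty).insert k0 v).insert "groupKey" g, true)) :
    insert_group_key data g =
      (((PySem.Dict.ofList (pre ++ [(k0, v)])).insert "groupKey" g).update post).items := by
  subst heq
  have hA : (pre ++ (k0, v) :: post).foldl (igkStep (pre ++ (k0, v) :: post) g) (PySem.Dict.empty, false)
      = (post.foldl (fun d kv => d.insert kv.1 kv.2)
          (((pre.foldl (fun d kv => d.insert kv.1 kv.2) PySem.Dict.empty).insert k0 v).insert "groupKey" g), true) := by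
    rw [List.foldl_append, igk_fold_false _ g pre _ hpre, List.foldl_cons, htrig,
        igk_fold_true]
  have hofl : PySem.Dict.ofList (pre ++ [(k0, v)])
      = (pre.foldl (fun d kv => d.insert kv.1 kv.2) PySem.Dict.empty).insert k0 v := by
    show (pre ++ [(k0, v)]).foldl (fun d kv => d.insert kv.1 kv.2) PySem.Dict.empty = _
    rw [List.foldl_append]; rfl
  unfold insert_group_key
  rw [hA, hofl]
  rfl

-- B's split index is |pre| when k0 first occurs right after pre
theorem idx_of_first (pre post : List (String × String)) (k0 v : String)
    (hpre : k0 ∉ pre.map Prod.fst) :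
    PySem.List.index? ((pre ++ (k0, v) :: post).map Prod.fst) k0 = some (pre.map Prod.fst).length := by
  rw [PySem.List.index?_eq_some_iff]
  exact ⟨pre.map Prod.fst, post.map Prod.fst, by rw [List.map_append]; rfl, rfl, hpre⟩

-- B's two slices at index |pre| + 1
theorem slice_take (pre post : List (String × String)) (k0 v : String) :
    PySem.List.slice (pre ++ (k0, v) :: post) none (some ((pre.length + 1 : Nat) : Int)) = pre ++ [(k0, v)] := by
  rw [PySem.List.slice_to _ (Int.natCast_nonneg _)]
  rw [Int.toNat_natCast, List.take_append, List.take_of_length_le (Nat.le_succ _),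
      Nat.add_sub_cancel_left, List.take_succ_cons, List.take_zero]

theorem slice_drop (pre post : List (String × String)) (k0 v : String) :
    PySem.List.slice (pre ++ (k0, v) :: post) (some ((pre.length + 1 : Nat) : Int)) none = post := by
  rw [PySem.List.slice_from _ (Int.natCast_nonneg _)]
  rw [Int.toNat_natCast, List.drop_append, List.drop_eq_nil_of_le (Nat.le_succ _),
      Nat.add_sub_cancel_left, List.drop_succ_cons, List.drop_zero, List.nil_append]

theorem igk_main (data : List (String × String)) (g : String) :
    insert_group_key data g = insert_group_key_alt data g := by
  by_cases hs : "sublayer" ∈ data.map Prod.fst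
  · -- sublayer present: both insert right after its first occurrence
    obtain ⟨pre, v, post, heq, hpre⟩ := exists_first_split data "sublayer" hs
    subst heq
    have hcont : ((pre ++ ("sublayer", v) :: post).map Prod.fst).contains "sublayer" = true :=
      List.contains_iff_mem.mpr hs
    have hidx := idx_of_first pre post "sublayer" v hpre
    have hleft := igk_split_case _ pre post "sublayer" v g rfl
      (fun kv hkv => ⟨fun hk => hpre (by rw [← hk]; exact List.mem_map_of_mem hkv),
        fun _ => hs⟩)
      (by
        have e1 : (("sublayer" : String) == "sublayer") = true := rfl
        simp only [igkStep, e1, Bool.not_false, Bool.true_and, Bool.true_or, if_true])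
    rw [hleft]
    unfold insert_group_key_alt
    simp only [hcont, if_true, hidx, Option.getD_some, List.length_map]
    rw [slice_take, slice_drop]
  · by_cases hl : "layer" ∈ data.map Prod.fst
    · -- layer present, no sublayer: both insert right after layer's first occurrence
      obtain ⟨pre, v, post, heq, hpre⟩ := exists_first_split data "layer" hl
      subst heq
      have hcontS : ((pre ++ ("layer", v) :: post).map Prod.fst).contains "sublayer" = false :=
        Bool.eq_false_iff.mpr (fun hc => hs (List.contains_iff_mem.mp hc))
      have hcontL : ((pre ++ ("layer", v) :: post).map Prod.fst).contains "layer" = true :=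
        List.contains_iff_mem.mpr hl
      have hidx := idx_of_first pre post "layer" v hpre
      have hleft := igk_split_case _ pre post "layer" v g rfl
        (fun kv hkv => ⟨fun hk => hs (by
            rw [← hk]
            exact List.mem_map_of_mem (List.mem_append.mpr (Or.inl hkv))),
          fun hk => absurd (by rw [← hk]; exact List.mem_map_of_mem hkv) hpre⟩)
        (by
          have e1 : (("layer" : String) == "sublayer") = false := rfl
          have e2 : (("layer" : String) == "layer") = true := rfl
          simp only [igkStep, e1, e2, hcontS, Bool.not_false, Bool.true_and,
            Bool.or_true, if_true])
      rw [hleft]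
      unfold insert_group_key_alt
      simp only [hcontS, Bool.false_eq_true, if_false, hcontL, if_true, hidx,
        Option.getD_some, List.length_map]
      rw [slice_take, slice_drop]
    · -- neither key present: groupKey appended at the end
      have hcontS : (data.map Prod.fst).contains "sublayer" = false :=
        Bool.eq_false_iff.mpr (fun hc => hs (List.contains_iff_mem.mp hc))
      have hcontL : (data.map Prod.fst).contains "layer" = false :=
        Bool.eq_false_iff.mpr (fun hc => hl (List.contains_iff_mem.mp hc))
      have hA : data.foldl (igkStep data g) (PySem.Dict.empty, false)
          = (data.foldl (fun d kv => d.insert kv.1 kv.2) PySem.Dict.empty, false) := by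
        apply igk_fold_false
        intro kv hkv
        exact ⟨fun hk => hs (hk ▸ List.mem_map_of_mem hkv),
               fun hk => absurd (hk ▸ List.mem_map_of_mem hkv) hl⟩
      unfold insert_group_key insert_group_key_alt
      rw [hA]
      simp only [hcontS, hcontL, Bool.false_eq_true, if_false, List.length_map]
      rw [PySem.List.slice_to _ (Int.natCast_nonneg _),
          PySem.List.slice_from _ (Int.natCast_nonneg _)]
      rw [Int.toNat_natCast, List.take_length, List.drop_length]
      rfl

-- ===== VERDICT (by name: the statement is the Claim_ definition above) =====
theorem insert_group_key_spec : Claim_equal_insert_group_key := by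
  intro data g _
  show _ = _
  exact igk_main data g
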